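-- pv_equiv track=rewrite | github.com/ermiyastesfaye-lab/A2SV_CP | A2SV G6 - Round #2 14-Feb-2025/C - The Splitting Game 265902.py | splitGame
-- ===== SOURCE A (Python) =====
-- def splitGame(s, n):
--     summ  = 0
--     lst1 = [0]*n
--     lst2 = [0]*n
--     dist_char = set()
--     for i in range(len(s)):
--         dist_char.add(s[i])
--         lst1[i] = len(dist_char)
--     dist_char.clear()
--     for j in range(len(s)-1, -1, -1):
--         dist_char.add(s[j])
--         lst2[j] = len(dist_char)
--     for k in range(len(s)-1):
--         summ = max(summ, lst1[k]+lst2[k+1])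
--     return summ
-- ===== SOURCE B (Python) =====
-- def splitGame(s, n):
--     # Event-sweep algorithm: record each character's first and last occurrence,
--     # turn them into a difference array over split points, and take the max of
--     # its running sum; no distinct-count prefix/suffix arrays, no sets.
--     m = len(s)
--     occ = {}
--     for i in range(m):
--         c = s[i]
--         if c in occ:
--             occ[c] = (occ[c][0], i)
--         else:
--             occ[c] = (i, i)
--     delta = [0] * (m + 1)
--     for f, l in occ.values():
--         delta[f] += 1   # c is in the left part of every split k >= f
--         delta[0] += 1   # c is in the right part of every split k <= l-1
--         delta[l] -= 1
--     ans = 0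
--     run = 0
--     for k in range(m - 1):
--         run += delta[k]
--         ans = max(ans, run)
--     return ans
-- ===== Notes on version B (the rewrite author's own statement) =====
-- stated objective: alternative
-- what changed: B replaces A's two distinct-count arrays (running prefix/suffix sets) with an event sweep: one pass records each character's first and last occurrence in a dict, these are turned into a difference array over split points, and the answer is the maximum running sum of that array; A raises IndexError when 0 < len(s) > n (its work arrays are sized by n), those inputs are outside Pre_.
import Mathlib
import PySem

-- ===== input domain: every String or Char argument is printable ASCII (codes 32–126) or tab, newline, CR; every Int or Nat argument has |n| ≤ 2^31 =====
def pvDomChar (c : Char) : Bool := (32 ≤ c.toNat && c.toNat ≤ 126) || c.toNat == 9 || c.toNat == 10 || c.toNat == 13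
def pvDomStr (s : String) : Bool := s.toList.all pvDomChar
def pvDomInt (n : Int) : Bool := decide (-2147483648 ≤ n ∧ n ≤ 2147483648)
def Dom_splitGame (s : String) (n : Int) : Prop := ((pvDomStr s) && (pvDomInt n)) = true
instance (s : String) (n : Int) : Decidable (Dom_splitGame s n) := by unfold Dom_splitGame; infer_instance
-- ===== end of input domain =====

-- B replaces A's prefix/suffix distinct-count arrays by an event sweep: first/last
-- occurrence of each character, a difference array over split points, max running sum.

-- ===== PORT A =====
def splitGame (s : String) (n : Int) : Int :=
  let cs := s.toList
  let summ : Int := 0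
  let lst1 : List Int := List.replicate n.toNat 0
  let lst2 : List Int := List.replicate n.toNat 0
  let r1 := (PySem.List.pyRange 0 (PySem.Str.len s) 1).foldl
    (fun (st : PySem.Set Char × List Int) i =>
      let d := PySem.Set.add st.1 (PySem.List.pyGetD cs i ' ')
      (d, PySem.List.pySetD st.2 i (PySem.List.len d)))
    (PySem.Set.empty, lst1)
  let lst1 := r1.2
  let r2 := (PySem.List.pyRange (PySem.Str.len s - 1) (-1) (-1)).foldl
    (fun (st : PySem.Set Char × List Int) j =>
      let d := PySem.Set.add st.1 (PySem.List.pyGetD cs j ' ')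
      (d, PySem.List.pySetD st.2 j (PySem.List.len d)))
    (PySem.Set.empty, lst2)
  let lst2 := r2.2
  (PySem.List.pyRange 0 (PySem.Str.len s - 1) 1).foldl
    (fun summ k => max summ (PySem.List.pyGetD lst1 k 0 + PySem.List.pyGetD lst2 (k + 1) 0))
    summ

-- ===== PORT B =====
-- loop bodies of Source B as named helpers (one per Python 'for' loop)
def pvOccStep (cs : List Char) (occ : PySem.Dict Char (Int × Int)) (i : Int) :
    PySem.Dict Char (Int × Int) :=
  let c := PySem.List.pyGetD cs i ' '
  if PySem.Dict.contains occ c then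
    PySem.Dict.insert occ c ((PySem.Dict.getD occ c (0, 0)).1, i)
  else
    PySem.Dict.insert occ c (i, i)

def pvDeltaStep (delta : List Int) (fl : Int × Int) : List Int :=
  let d1 := PySem.List.pySetD delta fl.1 (PySem.List.pyGetD delta fl.1 0 + 1)
  let d2 := PySem.List.pySetD d1 0 (PySem.List.pyGetD d1 0 0 + 1)
  PySem.List.pySetD d2 fl.2 (PySem.List.pyGetD d2 fl.2 0 - 1)

def splitGame_alt (s : String) (n : Int) : Int :=
  let cs := s.toList
  let m := cs.length
  let occ := (PySem.List.pyRange 0 (m : Int) 1).foldl (pvOccStep cs) PySem.Dict.empty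
  let delta := (PySem.Dict.values occ).foldl pvDeltaStep (List.replicate (m + 1) 0)
  let r := (PySem.List.pyRange 0 ((m : Int) - 1) 1).foldl
    (fun (acc : Int × Int) k =>
      let run := acc.1 + PySem.List.pyGetD delta k 0
      (run, max acc.2 run))
    (0, 0)
  r.2

-- ===== PRECONDITION & SPEC =====
-- Pre_ excludes exactly the inputs where A raises IndexError: a non-empty s with n < len(s)
-- (A's work arrays are sized by n, so the write lst1[i] is out of range there).
def Pre_splitGame (s : String) (n : Int) : Prop :=
  s.toList = [] ∨ (s.toList.length : Int) ≤ n
instance (s : String) (n : Int) : Decidable (Pre_splitGame s n) := by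
  unfold Pre_splitGame; infer_instance
def pvWitness_splitGame : String × Int := ("abcab", 5)

def Spec_splitGame (s : String) (n : Int) (out : Int) : Prop := out = splitGame_alt s n
instance (s : String) (n : Int) (out : Int) : Decidable (Spec_splitGame s n out) := by
  unfold Spec_splitGame; infer_instance

-- ===== CLAIM (what is proved, stated in full; the proofs are below) =====
def Claim_equal_splitGame : Prop := ∀ (s : String) (n : Int),
  Dom_splitGame s n → Pre_splitGame s n → Spec_splitGame s n (splitGame s n)

-- ===== LEMMAS AND PROOFS =====

def pvPcount (cs : List Char) (k : Nat) : Int :=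
  ((PySem.Set.ofList (cs.take (k + 1))).length : Int)

theorem pvOfList_append_singleton (l : List Char) (x : Char) :
    PySem.Set.ofList (l ++ [x]) = PySem.Set.add (PySem.Set.ofList l) x := by
  simp [PySem.Set.ofList_eq_foldl]

theorem pvGetDSet (l : List Int) (i j : Nat) (v : Int) (h : i < l.length) :
    (l.set i v).getD j 0 = if j = i then v else l.getD j 0 := by
  simp [List.getD_eq_getElem?_getD, List.getElem?_set]
  split
  · rename_i hji; subst hji; simp [List.getElem?_eq_getElem h]
  · rename_i hji; rw [if_neg (fun he => hji he.symm)]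

theorem pvTakeSucc (cs : List Char) (t : Nat) (h : t < cs.length) :
    cs.take (t+1) = cs.take t ++ [cs[t]] := by
  rw [List.take_succ, List.getElem?_eq_getElem h]; rfl

theorem pvBackLoop (cs : List Char) (j : Nat) :
    ∀ (d : PySem.Set Char) (arr : List Int), j < cs.length → cs.length ≤ arr.length →
    ((PySem.List.pyRange (j : Int) (-1) (-1)).foldl
      (fun (st : PySem.Set Char × List Int) j =>
        let d := PySem.Set.add st.1 (PySem.List.pyGetD cs j ' ')
        (d, PySem.List.pySetD st.2 j (PySem.List.len d)))
      (d, arr)).2.length = arr.length ∧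
    ∀ i : Nat, i < arr.length →
      ((PySem.List.pyRange (j : Int) (-1) (-1)).foldl
        (fun (st : PySem.Set Char × List Int) j =>
          let d := PySem.Set.add st.1 (PySem.List.pyGetD cs j ' ')
          (d, PySem.List.pySetD st.2 j (PySem.List.len d)))
        (d, arr)).2.getD i 0 =
      if i ≤ j then ((PySem.Set.update d (((cs.take (j + 1)).drop i).reverse)).length : Int)
      else arr.getD i 0 := by
  induction j with
  | zero =>
    intro d arr hj harr
    have hcons : PySem.List.pyRange ((0:Nat) : Int) (-1) (-1) = [((0:Nat) : Int)] := by
      rw [PySem.List.pyRange_neg_one_cons (by norm_num)]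
      norm_num [PySem.List.pyRange_neg_one_eq_nil]
    have hget : PySem.List.pyGetD cs (((0:Nat)) : Int) ' ' = cs[0] := by
      rw [PySem.List.pyGetD_natCast, List.getD_eq_getElem _ _ hj]
    rw [hcons, List.foldl_cons, List.foldl_nil]
    dsimp only
    simp only [hget, PySem.List.pySetD_natCast]
    refine ⟨by rw [List.length_set], ?_⟩
    intro i hi
    rw [pvGetDSet _ _ _ _ (by omega : 0 < arr.length)]
    by_cases hi0 : i = 0
    · subst hi0
      rw [if_pos rfl, if_pos (le_refl 0)]
      have : ((cs.take 1).drop 0).reverse = [cs[0]] := by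
        rw [pvTakeSucc cs 0 hj]; simp
      rw [this, PySem.List.len_eq]
      rfl
    · rw [if_neg hi0, if_neg (by omega)]
  | succ j ihj =>
    intro d arr hj harr
    have hcons : PySem.List.pyRange ((j+1 : Nat) : Int) (-1) (-1)
        = ((j+1 : Nat) : Int) :: PySem.List.pyRange ((j : Nat) : Int) (-1) (-1) := by
      rw [PySem.List.pyRange_neg_one_cons (by push_cast; omega)]
      norm_num
    have hlt : j + 1 < cs.length := hj
    have hget : PySem.List.pyGetD cs (((j+1:Nat)) : Int) ' ' = cs[j+1] := by
      rw [PySem.List.pyGetD_natCast, List.getD_eq_getElem _ _ hlt]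
    rw [hcons, List.foldl_cons]
    dsimp only
    simp only [hget, PySem.List.pySetD_natCast]
    obtain ⟨ihl, ihg⟩ := ihj (PySem.Set.add d cs[j+1])
      (arr.set (j+1) (PySem.List.len (PySem.Set.add d cs[j+1])))
      (by omega) (by rw [List.length_set]; omega)
    rw [ihl, List.length_set]
    refine ⟨rfl, ?_⟩
    intro i hi
    rw [ihg i (by rw [List.length_set]; omega)]
    by_cases hij : i ≤ j
    · rw [if_pos hij, if_pos (by omega)]
      have hdrop : (cs.take (j+1+1)).drop i = (cs.take (j+1)).drop i ++ [cs[j+1]] := by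
        rw [pvTakeSucc cs (j+1) hlt, List.drop_append_of_le_length (by simp; omega)]
      rw [hdrop, List.reverse_append]
      rfl
    · rw [if_neg hij]
      by_cases hij1 : i = j + 1
      · subst hij1
        rw [pvGetDSet _ _ _ _ (by omega : j+1 < arr.length), if_pos rfl, if_pos (le_refl _)]
        have hdrop : ((cs.take (j+1+1)).drop (j+1)).reverse = [cs[j+1]] := by
          rw [pvTakeSucc cs (j+1) hlt, List.drop_append_of_le_length (by simp; omega),
            List.drop_eq_nil_of_le (by simp)]
          simp
        rw [hdrop, PySem.List.len_eq]
        rfl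
      · rw [pvGetDSet _ _ _ _ (by omega : j+1 < arr.length), if_neg hij1, if_neg (by omega)]

theorem pvFwdLoop (cs : List Char) (arr : List Int) (harr : cs.length ≤ arr.length) :
    ∀ t : Nat, t ≤ cs.length →
    ((PySem.List.pyRange 0 (t : Int) 1).foldl
      (fun (st : PySem.Set Char × List Int) i =>
        let d := PySem.Set.add st.1 (PySem.List.pyGetD cs i ' ')
        (d, PySem.List.pySetD st.2 i (PySem.List.len d)))
      (PySem.Set.empty, arr)).1 = PySem.Set.ofList (cs.take t) ∧
    ((PySem.List.pyRange 0 (t : Int) 1).foldl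
      (fun (st : PySem.Set Char × List Int) i =>
        let d := PySem.Set.add st.1 (PySem.List.pyGetD cs i ' ')
        (d, PySem.List.pySetD st.2 i (PySem.List.len d)))
      (PySem.Set.empty, arr)).2.length = arr.length ∧
    ∀ i : Nat, i < arr.length →
      ((PySem.List.pyRange 0 (t : Int) 1).foldl
        (fun (st : PySem.Set Char × List Int) i =>
          let d := PySem.Set.add st.1 (PySem.List.pyGetD cs i ' ')
          (d, PySem.List.pySetD st.2 i (PySem.List.len d)))
        (PySem.Set.empty, arr)).2.getD i 0 =
      if i < t then pvPcount cs i else arr.getD i 0 := by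
  intro t
  induction t with
  | zero =>
    intro _
    simp [PySem.List.pyRange_one_eq_nil, PySem.Set.empty]
  | succ t ih =>
    intro ht
    have hlt : t < cs.length := by omega
    have hsplit : PySem.List.pyRange 0 ((t+1 : Nat) : Int) 1
        = PySem.List.pyRange 0 (t : Int) 1 ++ [(t : Int)] := by
      push_cast
      exact PySem.List.pyRange_one_succ_right (by positivity)
    obtain ⟨ih1, ih2, ih3⟩ := ih (by omega)
    have hget : PySem.List.pyGetD cs ((t : Nat) : Int) ' ' = cs[t] := by
      rw [PySem.List.pyGetD_natCast, List.getD_eq_getElem _ _ hlt]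
    have hp : pvPcount cs t = ((PySem.Set.add (PySem.Set.ofList (cs.take t)) cs[t]).length : Int) := by
      rw [pvPcount, pvTakeSucc cs t hlt, pvOfList_append_singleton]
    rw [hsplit, List.foldl_append] at *
    rcases hE : (PySem.List.pyRange 0 (t : Int) 1).foldl
      (fun (st : PySem.Set Char × List Int) i =>
        let d := PySem.Set.add st.1 (PySem.List.pyGetD cs i ' ')
        (d, PySem.List.pySetD st.2 i (PySem.List.len d)))
      (PySem.Set.empty, arr) with ⟨D, A⟩
    rw [hE] at ih1 ih2 ih3
    dsimp only at ih1 ih2 ih3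
    simp only [List.foldl_cons, List.foldl_nil]
    show (PySem.Set.add D (PySem.List.pyGetD cs ((t:Nat):Int) ' ')) = _ ∧
      (PySem.List.pySetD A ((t:Nat):Int)
        (PySem.List.len (PySem.Set.add D (PySem.List.pyGetD cs ((t:Nat):Int) ' ')))).length = _ ∧ _
    simp only [hget, ih1, PySem.List.pySetD_natCast]
    refine ⟨by rw [pvTakeSucc cs t hlt, pvOfList_append_singleton], by rw [List.length_set, ih2], ?_⟩
    intro i hi
    rw [pvGetDSet _ _ _ _ (by omega : t < A.length)]
    by_cases hit : i = t
    · subst hit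
      rw [if_pos rfl, if_pos (by omega), hp, PySem.List.len_eq]
    · rw [if_neg hit, ih3 i hi]
      by_cases hlt2 : i < t
      · rw [if_pos hlt2, if_pos (by omega)]
      · rw [if_neg hlt2, if_neg (by omega)]

theorem pvFinalLoop (lst1 lst2 : List Int) (t : Nat) :
    (PySem.List.pyRange 0 (t : Int) 1).foldl
      (fun summ k => max summ (PySem.List.pyGetD lst1 k 0 + PySem.List.pyGetD lst2 (k + 1) 0)) 0 =
    (List.range t).foldl (fun acc k => max acc (lst1.getD k 0 + lst2.getD (k + 1) 0)) 0 := by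
  rw [PySem.List.pyRange_one]
  simp only [Int.sub_zero, Int.toNat_natCast, List.foldl_map]
  apply PySem.List.foldl_congr_mem
  intro acc k _
  have h1 : (0:Int) + (k:Int) = ((k : Nat) : Int) := by push_cast; ring
  rw [h1, PySem.List.pyGetD_natCast]
  have h2 : ((k:Int)) + 1 = (((k+1 : Nat)) : Int) := by push_cast; ring
  rw [h2, PySem.List.pyGetD_natCast]

theorem pvLenEq (l l2 : List Char) (hn : l.Nodup) (h : ∀ x, x ∈ l ↔ x ∈ l2) :
    l.length = (PySem.Set.ofList l2).length := by
  exact ((List.perm_ext_iff_of_nodup hn (PySem.Set.nodup_ofList l2)).mpr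
    (fun a => (h a).trans ((PySem.Set.mem_ofList l2 a)).symm)).length_eq

theorem pvMemTake (cs : List Char) (nn : Nat) (c : Char) :
    c ∈ cs.take nn ↔ ∃ i, i < nn ∧ cs[i]? = some c := by
  constructor
  · intro h
    obtain ⟨i, hi⟩ := List.mem_iff_getElem?.mp h
    obtain ⟨hlt, heq⟩ := List.getElem?_eq_some_iff.mp hi
    have hlt' : i < nn ∧ i < cs.length := by
      simp [List.length_take] at hlt; omega
    refine ⟨i, hlt'.1, List.getElem?_eq_some_iff.mpr ⟨hlt'.2, ?_⟩⟩
    rw [← heq]; exact (List.getElem_take).symm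
  · rintro ⟨i, hin, hi⟩
    obtain ⟨hlt, heq⟩ := List.getElem?_eq_some_iff.mp hi
    apply List.mem_iff_getElem?.mpr
    refine ⟨i, List.getElem?_eq_some_iff.mpr ⟨by simp [List.length_take]; omega, ?_⟩⟩
    rw [List.getElem_take]; exact heq

theorem pvMemDrop (cs : List Char) (nn : Nat) (c : Char) :
    c ∈ cs.drop nn ↔ ∃ i, nn ≤ i ∧ cs[i]? = some c := by
  constructor
  · intro h
    obtain ⟨i, hi⟩ := List.mem_iff_getElem?.mp h
    obtain ⟨hlt, heq⟩ := List.getElem?_eq_some_iff.mp hi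
    have hlen : (cs.drop nn).length = cs.length - nn := List.length_drop
    refine ⟨nn + i, by omega, List.getElem?_eq_some_iff.mpr ⟨by omega, ?_⟩⟩
    rw [← heq]; exact (List.getElem_drop (h := hlt)).symm
  · rintro ⟨i, hin, hi⟩
    obtain ⟨hlt, heq⟩ := List.getElem?_eq_some_iff.mp hi
    apply List.mem_iff_getElem?.mpr
    have hlen : (cs.drop nn).length = cs.length - nn := List.length_drop
    refine ⟨i - nn, List.getElem?_eq_some_iff.mpr ⟨by omega, ?_⟩⟩
    rw [List.getElem_drop]
    have : nn + (i - nn) = i := by omega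
    simp_rw [this]; exact heq

def pvPSum (arr : List Int) (t : Nat) : Int :=
  ((List.range t).map (fun i => arr.getD i 0)).sum

theorem pvPSumSucc (arr : List Int) (t : Nat) :
    pvPSum arr (t + 1) = pvPSum arr t + arr.getD t 0 := by
  simp [pvPSum, List.range_succ]

theorem pvPSumZero (N t : Nat) : pvPSum (List.replicate N (0:Int)) t = 0 := by
  unfold pvPSum
  have h : ∀ i : Nat, (List.replicate N (0:Int)).getD i 0 = 0 := by
    intro i
    rw [List.getD_eq_getElem?_getD, List.getElem?_replicate]
    split <;> rfl
  rw [List.map_congr_left (fun i _ => h i)]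
  simp

theorem pvPSumSet (arr : List Int) (j : Nat) (v : Int) (hj : j < arr.length) (t : Nat) :
    pvPSum (arr.set j (arr.getD j 0 + v)) t = pvPSum arr t + (if j < t then v else 0) := by
  induction t with
  | zero => simp [pvPSum]
  | succ t ih =>
    rw [pvPSumSucc, pvPSumSucc, ih, pvGetDSet _ _ _ _ hj]
    by_cases hjt : t = j
    · subst hjt; rw [if_pos rfl, if_neg (by omega), if_pos (by omega)]; ring
    · rw [if_neg hjt]
      by_cases hlt : j < t
      · rw [if_pos hlt, if_pos (by omega)]; ring
      · rw [if_neg hlt, if_neg (by omega)]; ring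

theorem pvOccInv (cs : List Char) : ∀ t : Nat, t ≤ cs.length →
    ((PySem.List.pyRange 0 (t : Int) 1).foldl (pvOccStep cs) PySem.Dict.empty).keys
      = PySem.Set.ofList (cs.take t) ∧
    ∀ p ∈ ((PySem.List.pyRange 0 (t : Int) 1).foldl (pvOccStep cs) PySem.Dict.empty).items,
      ∃ fn ln : Nat, p.2 = ((fn : Int), (ln : Int)) ∧ fn ≤ ln ∧ ln < t ∧
        cs[fn]? = some p.1 ∧ cs[ln]? = some p.1 ∧ p.1 ∉ cs.take fn ∧
        ∀ j : Nat, ln < j → j < t → cs[j]? ≠ some p.1 := by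
  intro t
  induction t with
  | zero =>
    intro _
    rw [show ((0:Nat):Int) = 0 from rfl, PySem.List.pyRange_one_eq_nil (le_refl 0)]
    constructor
    · simp [PySem.Dict.empty, PySem.Dict.keys]
    · intro p hp
      simp [PySem.Dict.empty, PySem.Dict.items] at hp
  | succ t ih =>
    intro ht
    obtain ⟨hk, hi⟩ := ih (by omega)
    have hlt : t < cs.length := by omega
    have hsplit : PySem.List.pyRange 0 ((t+1 : Nat) : Int) 1
        = PySem.List.pyRange 0 (t : Int) 1 ++ [(t : Int)] := by
      push_cast
      exact PySem.List.pyRange_one_succ_right (by positivity)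
    rw [hsplit]
    simp only [List.foldl_append, List.foldl_cons, List.foldl_nil]
    set d := (PySem.List.pyRange 0 (t : Int) 1).foldl (pvOccStep cs) PySem.Dict.empty with hd
    have hc : PySem.List.pyGetD cs ((t : Nat) : Int) ' ' = cs[t] := by
      rw [PySem.List.pyGetD_natCast, List.getD_eq_getElem _ _ hlt]
    have hnd : d.keys.Nodup := by rw [hk]; exact PySem.Set.nodup_ofList (cs.take t)
    unfold pvOccStep
    rw [hc]
    by_cases hcont : d.contains cs[t] = true
    · rw [if_pos hcont]
      have hsome : (d.get? cs[t]).isSome := by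
        rw [← PySem.Dict.contains_eq_isSome_get? d cs[t]]; exact hcont
      obtain ⟨v, hv⟩ := Option.isSome_iff_exists.mp hsome
      have hmem : (cs[t], v) ∈ d.items := PySem.Dict.mem_items_of_get?_eq_some d hv
      obtain ⟨fn, ln, hpv, hfl, hlnt, hfget, hlget, hfnot, _⟩ := hi _ hmem
      have hgetD : PySem.Dict.getD d cs[t] (0,0) = v := by
        rw [PySem.Dict.getD_eq_get?_getD d, hv]; rfl
      have hmemk : cs[t] ∈ PySem.Set.ofList (cs.take t) := by
        rw [← hk]; exact (PySem.Dict.contains_iff_mem_keys d cs[t]).mp hcont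
      constructor
      · rw [PySem.Dict.keys_insert_of_contains d _ hcont, hk, pvTakeSucc cs t hlt,
          pvOfList_append_singleton, PySem.Set.add_of_mem hmemk]
      · intro p hp
        rcases (PySem.Dict.mem_items_insert d _ _ _).mp hp with hpEq | ⟨hpold, hpne⟩
        · have hp1 : p.1 = cs[t] := by rw [hpEq]
          have hp2 : p.2 = ((fn : Int), ((t:Nat) : Int)) := by
            have hpv' : v = ((fn : Int), (ln : Int)) := hpv
            simp [hpEq, hgetD, hpv']
          refine ⟨fn, t, hp2, by omega, by omega, ?_, ?_, ?_, ?_⟩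
          · rw [hp1]; simpa using hfget
          · rw [hp1, List.getElem?_eq_getElem hlt]
          · rw [hp1]; simpa using hfnot
          · intro j hj1 hj2; omega
        · obtain ⟨fn', ln', h1, h2, h3, h4, h5, h6, h7⟩ := hi p hpold
          refine ⟨fn', ln', h1, h2, by omega, h4, h5, h6, ?_⟩
          intro j hj1 hj2
          by_cases hjt : j = t
          · rw [hjt, List.getElem?_eq_getElem hlt]
            intro he
            exact hpne (by injection he with h; rw [h])
          · exact h7 j hj1 (by omega)
    · rw [if_neg hcont]
      have hcf : d.contains cs[t] = false := by simpa using hcont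
      have hnotmem : cs[t] ∉ PySem.Set.ofList (cs.take t) := by
        rw [← hk]; intro hmm
        exact hcont (((PySem.Dict.contains_iff_mem_keys d cs[t]).mpr hmm))
      constructor
      · rw [PySem.Dict.keys_insert_of_not_contains d _ hcf, hk, pvTakeSucc cs t hlt,
          pvOfList_append_singleton, PySem.Set.add_of_not_mem hnotmem]
      · intro p hp
        rw [PySem.Dict.items_insert_of_not_contains d _ hcf] at hp
        rcases List.mem_append.mp hp with hold | hnew
        · obtain ⟨fn', ln', h1, h2, h3, h4, h5, h6, h7⟩ := hi p hold
          refine ⟨fn', ln', h1, h2, by omega, h4, h5, h6, ?_⟩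
          intro j hj1 hj2
          by_cases hjt : j = t
          · rw [hjt, List.getElem?_eq_getElem hlt]
            intro he
            have hp1 : p.1 = cs[t] := by injection he with h; rw [h]
            have : p.1 ∈ d.keys := PySem.Dict.mem_keys_of_mem_items d hold
            rw [hk, hp1] at this
            exact hnotmem this
          · exact h7 j hj1 (by omega)
        · have hpEq : p = (cs[t], (((t:Nat) : Int), ((t:Nat) : Int))) := by simpa using hnew
          refine ⟨t, t, by rw [hpEq], le_refl t, by omega, ?_, ?_, ?_, ?_⟩
          · rw [hpEq, List.getElem?_eq_getElem hlt]
          · rw [hpEq, List.getElem?_eq_getElem hlt]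
          · rw [hpEq]
            intro hmm
            exact hnotmem ((PySem.Set.mem_ofList _ _).mpr hmm)
          · intro j hj1 hj2; omega

theorem pvDeltaLoop (m : Nat) (vs : List (Int × Int)) :
    ∀ arr : List Int, arr.length = m + 1 →
    (∀ p ∈ vs, ∃ fn ln : Nat, p = ((fn : Int), (ln : Int)) ∧ fn ≤ ln ∧ ln < m) →
    (vs.foldl pvDeltaStep arr).length = m + 1 ∧
    ∀ t : Nat, t ≤ m → pvPSum (vs.foldl pvDeltaStep arr) t = pvPSum arr t +
      (vs.map (fun p => (if p.1 < (t : Int) then (1:Int) else 0) + (if 0 < t then (1:Int) else 0)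
        + (if p.2 < (t : Int) then (-1:Int) else 0))).sum := by
  induction vs with
  | nil => intro arr harr _; simp [harr]
  | cons p vs ih =>
    intro arr harr hvs
    obtain ⟨fn, ln, hp, hfl, hlm⟩ := hvs p (List.mem_cons_self)
    subst hp
    have hfn : fn < arr.length := by omega
    have hstep : pvDeltaStep arr ((fn : Int), (ln : Int))
        = ((arr.set fn (arr.getD fn 0 + 1)).set 0
            ((arr.set fn (arr.getD fn 0 + 1)).getD 0 0 + 1)).set ln
            (((arr.set fn (arr.getD fn 0 + 1)).set 0
              ((arr.set fn (arr.getD fn 0 + 1)).getD 0 0 + 1)).getD ln 0 + (-1)) := by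
      show pvDeltaStep arr ((fn : Int), (ln : Int)) = _
      unfold pvDeltaStep
      simp only [PySem.List.pySetD_natCast, PySem.List.pyGetD_natCast]
      have h0 : (0:Int) = ((0:Nat):Int) := rfl
      rw [h0, PySem.List.pySetD_natCast, PySem.List.pyGetD_natCast]
      rw [sub_eq_add_neg]
    have hlen3 : (pvDeltaStep arr ((fn : Int), (ln : Int))).length = m + 1 := by
      rw [hstep, List.length_set, List.length_set, List.length_set]; exact harr
    rw [List.foldl_cons]
    obtain ⟨ihl, ihs⟩ := ih (pvDeltaStep arr ((fn : Int), (ln : Int))) hlen3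
      (fun q hq => hvs q (List.mem_cons_of_mem _ hq))
    refine ⟨ihl, ?_⟩
    intro t ht
    rw [ihs t ht, hstep]
    have l1 : (arr.set fn (arr.getD fn 0 + 1)).length = m + 1 := by
      rw [List.length_set, harr]
    have l2 : ((arr.set fn (arr.getD fn 0 + 1)).set 0
        ((arr.set fn (arr.getD fn 0 + 1)).getD 0 0 + 1)).length = m + 1 := by
      rw [List.length_set, l1]
    rw [pvPSumSet _ ln (-1) (by rw [l2]; omega), pvPSumSet _ 0 1 (by rw [l1]; omega),
      pvPSumSet _ fn 1 (by rw [harr]; omega)]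
    simp only [List.map_cons, List.sum_cons, Nat.cast_lt]
    ring

theorem pvSweepLoop (delta : List Int) (t : Nat) :
    (PySem.List.pyRange 0 (t : Int) 1).foldl
      (fun (acc : Int × Int) k =>
        let run := acc.1 + PySem.List.pyGetD delta k 0
        (run, max acc.2 run))
      (0, 0)
    = (pvPSum delta t, (List.range t).foldl (fun a k => max a (pvPSum delta (k + 1))) 0) := by
  induction t with
  | zero => simp [PySem.List.pyRange_one_eq_nil, pvPSum]
  | succ t ih =>
    have hsplit : PySem.List.pyRange 0 ((t+1 : Nat) : Int) 1
        = PySem.List.pyRange 0 (t : Int) 1 ++ [(t : Int)] := by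
      push_cast
      exact PySem.List.pyRange_one_succ_right (by positivity)
    rw [hsplit, List.foldl_append, ih, List.range_succ, List.foldl_append]
    simp only [List.foldl_cons, List.foldl_nil, PySem.List.pyGetD_natCast]
    rw [← pvPSumSucc]

theorem pvBridge (cs : List Char) (k : Nat) (hk : k < cs.length) :
    pvPSum ((((PySem.List.pyRange 0 (cs.length : Int) 1).foldl (pvOccStep cs)
        PySem.Dict.empty).values).foldl pvDeltaStep (List.replicate (cs.length + 1) 0)) (k + 1)
      = pvPcount cs k + ((PySem.Set.ofList ((cs.drop (k + 1)).reverse)).length : Int) := by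
  obtain ⟨hkeys, hitems⟩ := pvOccInv cs cs.length (le_refl _)
  set dd := (PySem.List.pyRange 0 (cs.length : Int) 1).foldl (pvOccStep cs) PySem.Dict.empty with hdd
  have hvals : dd.values = dd.items.map (·.2) := rfl
  have hkeysm : dd.keys = dd.items.map (·.1) := rfl
  have hvs : ∀ p ∈ dd.values, ∃ fn ln : Nat, p = ((fn:Int),(ln:Int)) ∧ fn ≤ ln ∧ ln < cs.length := by
    intro p hp
    rw [hvals] at hp
    obtain ⟨q, hq, hqp⟩ := List.mem_map.mp hp
    obtain ⟨fn, ln, h1, h2, h3, _, _, _, _⟩ := hitems q hq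
    exact ⟨fn, ln, by rw [← hqp, h1], h2, h3⟩
  obtain ⟨_, hs⟩ := pvDeltaLoop cs.length dd.values (List.replicate (cs.length+1) 0)
      (by rw [List.length_replicate]) hvs
  rw [hs (k+1) (by omega), pvPSumZero, zero_add]
  have hcong : (dd.values.map (fun p => (if p.1 < ((k+1 : Nat) : Int) then (1:Int) else 0)
      + (if 0 < k+1 then (1:Int) else 0) + (if p.2 < ((k+1:Nat) : Int) then (-1:Int) else 0))).sum
      = (dd.items.map (fun q => (if decide (q.1 ∈ cs.take (k+1)) then (1:Int) else 0)
        + (if decide (q.1 ∈ cs.drop (k+1)) then (1:Int) else 0))).sum := by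
    rw [hvals, List.map_map]
    refine congrArg List.sum (List.map_congr_left ?_)
    intro q hq
    obtain ⟨fn, ln, h1, h2, h3, h4, h5, h6, h7⟩ := hitems q hq
    simp only [Function.comp, h1]
    have hfniff : fn < k + 1 ↔ q.1 ∈ cs.take (k+1) := by
      constructor
      · intro h; exact (pvMemTake cs (k+1) q.1).mpr ⟨fn, h, h4⟩
      · intro h
        obtain ⟨i, hi1, hi2⟩ := (pvMemTake cs (k+1) q.1).mp h
        by_contra hno
        exact h6 ((pvMemTake cs fn q.1).mpr ⟨i, by omega, hi2⟩)
    have hlniff : k + 1 ≤ ln ↔ q.1 ∈ cs.drop (k+1) := by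
      constructor
      · intro h; exact (pvMemDrop cs (k+1) q.1).mpr ⟨ln, h, h5⟩
      · intro h
        obtain ⟨i, hi1, hi2⟩ := (pvMemDrop cs (k+1) q.1).mp h
        by_contra hno
        have hilen : i < cs.length := (List.getElem?_eq_some_iff.mp hi2).1
        exact h7 i (by omega) hilen hi2
    by_cases hA : q.1 ∈ cs.take (k+1) <;> by_cases hB : q.1 ∈ cs.drop (k+1) <;>
      simp only [hA, hB, decide_true, decide_false, if_true, if_false] <;>
      rw [if_pos (by omega : 0 < k + 1)]
    · rw [if_pos (by exact_mod_cast hfniff.mpr hA), if_neg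
        (by have := hlniff.mpr hB; push_cast; omega)]
      norm_num
    · rw [if_pos (by exact_mod_cast hfniff.mpr hA), if_pos
        (by have : ¬ (k+1 ≤ ln) := fun hc => hB (hlniff.mp hc); push_cast; omega)]
      norm_num
    · rw [if_neg (by have : ¬ (fn < k+1) := fun hc => hA (hfniff.mp hc); push_cast; omega),
        if_neg (by have := hlniff.mpr hB; push_cast; omega)]
      norm_num
    · rw [if_neg (by have : ¬ (fn < k+1) := fun hc => hA (hfniff.mp hc); push_cast; omega),
        if_pos (by have : ¬ (k+1 ≤ ln) := fun hc => hB (hlniff.mp hc); push_cast; omega)]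
      norm_num
  rw [hcong, PySem.List.sum_map_add_int dd.items
      (fun q => if decide (q.1 ∈ cs.take (k+1)) then (1:Int) else 0)
      (fun q => if decide (q.1 ∈ cs.drop (k+1)) then (1:Int) else 0),
    PySem.List.sum_map_ite_one_zero (fun q => decide (q.1 ∈ cs.take (k+1))) dd.items,
    PySem.List.sum_map_ite_one_zero (fun q => decide (q.1 ∈ cs.drop (k+1))) dd.items]
  have hkeyscs : dd.items.map (·.1) = PySem.Set.ofList cs := by
    rw [← hkeysm, hkeys, List.take_length]
  have hc1 : List.countP (fun q => decide (q.1 ∈ cs.take (k+1))) dd.items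
      = (PySem.Set.ofList (cs.take (k+1))).length := by
    rw [show (fun (q : Char × Int × Int) => decide (q.1 ∈ cs.take (k+1)))
        = (fun c => decide (c ∈ cs.take (k+1))) ∘ (·.1) from rfl, ← List.countP_map, hkeyscs,
      List.countP_eq_length_filter]
    apply pvLenEq
    · exact List.Nodup.filter _ (PySem.Set.nodup_ofList cs)
    · intro x
      rw [List.mem_filter]
      simp only [decide_eq_true_eq, PySem.Set.mem_ofList]
      exact ⟨fun h => h.2, fun h => ⟨List.mem_of_mem_take h, h⟩⟩
  have hc2 : List.countP (fun q => decide (q.1 ∈ cs.drop (k+1))) dd.items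
      = (PySem.Set.ofList ((cs.drop (k+1)).reverse)).length := by
    rw [show (fun (q : Char × Int × Int) => decide (q.1 ∈ cs.drop (k+1)))
        = (fun c => decide (c ∈ cs.drop (k+1))) ∘ (·.1) from rfl, ← List.countP_map, hkeyscs,
      List.countP_eq_length_filter]
    apply pvLenEq
    · exact List.Nodup.filter _ (PySem.Set.nodup_ofList cs)
    · intro x
      rw [List.mem_filter, List.mem_reverse]
      simp only [decide_eq_true_eq, PySem.Set.mem_ofList]
      exact ⟨fun h => h.2, fun h => ⟨List.mem_of_mem_drop h, h⟩⟩
  rw [hc1, hc2, pvPcount]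

-- ===== VERDICT (by name: the statement is the Claim_ definition above) =====
theorem splitGame_spec : Claim_equal_splitGame := by
  intro s n _ hpre
  unfold Spec_splitGame
  by_cases h0 : s.toList = []
  · simp [splitGame, splitGame_alt, h0, PySem.List.pyRange_one_eq_nil,
      PySem.List.pyRange_neg_one_eq_nil, PySem.Dict.empty, PySem.Dict.values]
  · have hm1 : 1 ≤ s.toList.length := by
      cases hl : s.toList with
      | nil => exact absurd hl h0
      | cons a t => simp [hl]
    have hn : (s.toList.length : Int) ≤ n := by
      rcases hpre with h | h
      · exact absurd h h0
      · exact h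
    have hnn : s.toList.length ≤ n.toNat := by omega
    have hlen : PySem.Str.len s = (s.toList.length : Int) := by simp
    have hc : ((s.toList.length - 1 : Nat) : Int) = (s.toList.length : Int) - 1 := by
      push_cast [hm1]; ring
    simp only [splitGame, splitGame_alt, hlen]
    rw [← hc, pvFinalLoop, pvSweepLoop]
    dsimp only
    apply PySem.List.foldl_congr_mem
    intro acc k hk
    rw [List.mem_range] at hk
    obtain ⟨_, hA1len, hA1get⟩ := pvFwdLoop s.toList (List.replicate n.toNat 0)
      (by simp only [List.length_replicate]; exact hnn) s.toList.length (le_refl _)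
    obtain ⟨hA2len, hA2get⟩ := pvBackLoop s.toList (s.toList.length - 1) PySem.Set.empty
      (List.replicate n.toNat 0) (by omega) (by simp only [List.length_replicate]; exact hnn)
    rw [hA1get k (by simp only [List.length_replicate]; omega),
      hA2get (k+1) (by simp only [List.length_replicate]; omega)]
    rw [if_pos (by omega : k < s.toList.length), if_pos (by omega : k + 1 ≤ s.toList.length - 1)]
    have htake : s.toList.take (s.toList.length - 1 + 1) = s.toList := by
      rw [show s.toList.length - 1 + 1 = s.toList.length by omega, List.take_length]
    rw [htake]
    have hub : PySem.Set.update PySem.Set.empty ((s.toList.drop (k+1)).reverse)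
        = PySem.Set.ofList ((s.toList.drop (k+1)).reverse) := rfl
    rw [hub]
    exact congrArg (max acc) (pvBridge s.toList k (by omega)).symm
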